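-- pv_equiv track=rewrite | github.com/Okkar25/Python_Course | Day25/app.py | piggyBank
-- ===== SOURCE A (Python) =====
-- def piggyBank(list):
--   currency = {"Q": 0, "D": 0, "N": 0, "P": 0}
--   total = 0
--
--   for value in list:
--       if value not in currency:
--           currency[value] = 1
--       else:
--           currency[value] += 1
--
--   for value in list:
--       if value == "Q":
--           total += 25
--       elif value == "D":
--           total += 10
--       elif value == "N":
--           total += 5
--       else:
--           total += 1
--
--   return (currency, total)
-- ===== SOURCE B (Python) =====
-- def piggyBank(list):
--   currency = {"Q": 0, "D": 0, "N": 0, "P": 0}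
--   for value in list:
--       currency[value] = currency.get(value, 0) + 1
--   total = (25 * currency["Q"] + 10 * currency["D"] + 5 * currency["N"]
--            + (len(list) - currency["Q"] - currency["D"] - currency["N"]))
--   return (currency, total)
-- ===== Notes on version B (the rewrite author's own statement) =====
-- stated objective: simpler
-- what changed: The second scan over the list is deleted: the total is computed in closed form from the counts table (25*Q+10*D+5*N plus one per remaining coin), and the counting loop uses a single get-based upsert instead of a membership branch.
import Mathlib
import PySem

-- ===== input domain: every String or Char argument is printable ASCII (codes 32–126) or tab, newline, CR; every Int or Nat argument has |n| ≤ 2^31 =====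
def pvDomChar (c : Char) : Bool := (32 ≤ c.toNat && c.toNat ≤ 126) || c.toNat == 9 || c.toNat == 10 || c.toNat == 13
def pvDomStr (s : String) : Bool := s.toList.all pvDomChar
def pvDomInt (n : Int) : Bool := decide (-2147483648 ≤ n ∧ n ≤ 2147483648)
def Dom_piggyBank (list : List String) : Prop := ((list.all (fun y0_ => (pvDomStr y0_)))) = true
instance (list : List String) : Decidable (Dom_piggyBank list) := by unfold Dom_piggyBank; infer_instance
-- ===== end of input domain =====

-- B deletes A's second pass: the total is a closed-form expression over the counts table (simpler, same O(n)).


-- ===== PORT A =====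
def pvInitCurrency : PySem.Dict String Int :=
  PySem.Dict.ofList [("Q", 0), ("D", 0), ("N", 0), ("P", 0)]

def piggyBank (list : List String) : (List (String × Int)) × Int :=
  let currency := list.foldl
    (fun d value => if d.contains value = false then d.insert value 1
                    else d.modify value 0 (· + 1)) pvInitCurrency
  let total := list.foldl
    (fun t value => if value = "Q" then t + 25
                    else if value = "D" then t + 10
                    else if value = "N" then t + 5
                    else t + 1) (0 : Int)
  (currency.items, total)

-- ===== PORT B =====
def piggyBank_alt (list : List String) : (List (String × Int)) × Int :=
  let currency := list.foldl (fun d value => d.insert value (d.getD value 0 + 1)) pvInitCurrency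
  let total := 25 * currency.getD "Q" 0 + 10 * currency.getD "D" 0 + 5 * currency.getD "N" 0
      + ((list.length : Int) - currency.getD "Q" 0 - currency.getD "D" 0 - currency.getD "N" 0)
  (currency.items, total)

-- ===== PRECONDITION & SPEC =====
def Spec_piggyBank (list : List String) (out : (List (String × Int)) × Int) : Prop := out = piggyBank_alt list
instance (list : List String) (out : (List (String × Int)) × Int) : Decidable (Spec_piggyBank list out) := by unfold Spec_piggyBank; infer_instance

-- ===== CLAIM (what is proved, stated in full; the proofs are below) =====
def Claim_equal_piggyBank : Prop := ∀ (list : List String), Dom_piggyBank list → Spec_piggyBank list (piggyBank list)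

-- ===== LEMMAS AND PROOFS =====

-- A's branching update is exactly B's get-based upsert, on every dict state.
theorem pvStep_eq (d : PySem.Dict String Int) (v : String) :
    (if d.contains v = false then d.insert v 1 else d.modify v 0 (· + 1))
      = d.insert v (d.getD v 0 + 1) := by
  by_cases h : d.contains v = false
  · simp [h, PySem.Dict.getD_of_not_contains]
  · simp [h, PySem.Dict.modify, PySem.Dict.insert, PySem.Dict.getD]

theorem pvFold_eq (list : List String) (d : PySem.Dict String Int) :
    list.foldl (fun d value => if d.contains value = false then d.insert value 1
                    else d.modify value 0 (· + 1)) d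
      = list.foldl (fun d value => d.insert value (d.getD value 0 + 1)) d := by
  simp only [pvStep_eq]

-- A's second pass, in closed form over the counts of the list.
theorem pvTotal_eq (list : List String) (t : Int) :
    list.foldl
      (fun t value => if value = "Q" then t + 25
                      else if value = "D" then t + 10
                      else if value = "N" then t + 5
                      else t + 1) t
      = t + 25 * (list.count "Q" : Int) + 10 * (list.count "D" : Int) + 5 * (list.count "N" : Int)
          + ((list.length : Int) - (list.count "Q" : Int) - (list.count "D" : Int) - (list.count "N" : Int)) := by
  induction list generalizing t with
  | nil => simp
  | cons v l ih =>
    simp only [List.foldl_cons, ih, List.count_cons, List.length_cons]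
    by_cases hq : v = "Q" <;> by_cases hd : v = "D" <;> by_cases hn : v = "N" <;>
      simp_all <;> ring

theorem pvGetD_fold (list : List String) (k : String) (hk : pvInitCurrency.getD k 0 = 0) :
    (list.foldl (fun d value => d.insert value (d.getD value 0 + 1)) pvInitCurrency).getD k 0
      = (list.count k : Int) := by
  rw [PySem.Dict.getD_foldl_insert_add_one, hk]; ring

theorem pvGetD_Q (list : List String) :
    (list.foldl (fun d value => d.insert value (d.getD value 0 + 1)) pvInitCurrency).getD "Q" 0
      = (list.count "Q" : Int) := pvGetD_fold list "Q" (by decide)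

theorem pvGetD_D (list : List String) :
    (list.foldl (fun d value => d.insert value (d.getD value 0 + 1)) pvInitCurrency).getD "D" 0
      = (list.count "D" : Int) := pvGetD_fold list "D" (by decide)

theorem pvGetD_N (list : List String) :
    (list.foldl (fun d value => d.insert value (d.getD value 0 + 1)) pvInitCurrency).getD "N" 0
      = (list.count "N" : Int) := pvGetD_fold list "N" (by decide)

-- ===== VERDICT (by name: the statement is the Claim_ definition above) =====
theorem piggyBank_spec : Claim_equal_piggyBank := by
  intro list _
  unfold Spec_piggyBank piggyBank piggyBank_alt
  simp only [pvFold_eq, pvTotal_eq, pvGetD_Q, pvGetD_D, pvGetD_N]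
  refine Prod.ext rfl ?_
  simp only []
  ring
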